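-- pv_equiv track=rewrite | github.com/coral2742/Codember2022 | challenge05/main2.py | hungry_games
-- ===== SOURCE A (Python) =====
-- def hungry_games(index):
--     vivosCounter = len(index)
--     # Si sólo queda uno
--     if vivosCounter == 1:
--         return index[0]
--     # En cada ronda matan a la mitad
--     vivosCounter = vivosCounter//2
--     vivos = []
--     for superviviente in range(vivosCounter):
--         vivos.append(index[superviviente*2])
--     # Si los vivos son un número impar, al primero le mata el último
--     if len(index) % 2 != 0:
--         vivos.pop(0)
--         vivos.append(index[len(index)-1])
--
--     index = vivos
--
--     return hungry_games(index)
-- ===== SOURCE B (Python) =====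
-- def hungry_games(index):
--     # Track only the surviving position arithmetically across rounds: O(log n), no list rebuild.
--     lengths = []
--     n = len(index)
--     while n > 1:
--         lengths.append(n)
--         n //= 2
--     p = 0
--     for m in reversed(lengths):
--         p = 2 * p + 2 if m % 2 else 2 * p
--     return index[p]
-- ===== Notes on version B (the rewrite author's own statement) =====
-- stated objective: faster
-- what changed: Instead of rebuilding the survivor list each round, B records the round lengths and folds them back-to-front to compute the single surviving position arithmetically, then indexes once.
import Mathlib
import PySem

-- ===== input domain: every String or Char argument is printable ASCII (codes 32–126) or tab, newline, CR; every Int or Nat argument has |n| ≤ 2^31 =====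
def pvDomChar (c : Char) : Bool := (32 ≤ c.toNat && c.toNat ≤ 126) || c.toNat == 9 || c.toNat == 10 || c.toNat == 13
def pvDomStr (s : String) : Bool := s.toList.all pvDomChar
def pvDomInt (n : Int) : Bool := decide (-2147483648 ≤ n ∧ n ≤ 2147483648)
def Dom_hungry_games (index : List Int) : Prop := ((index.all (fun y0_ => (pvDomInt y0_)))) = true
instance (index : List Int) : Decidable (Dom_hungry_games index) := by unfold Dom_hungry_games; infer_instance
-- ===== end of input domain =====

-- B replaces A's per-round survivor-list rebuild by folding the round lengths into a single
-- surviving position (asymptotically fewer list operations); proved equal on nonempty lists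
-- (A recurses forever on the empty list, which Pre_ excludes).


-- ===== PORT A =====
-- one round: build `vivos` (every second survivor), and on odd length pop the first
-- and append the last element (vivos.pop(0) → drop 1; index[len-1] → pyGetD at len-1)
def pvRound (index : List Int) : List Int :=
  let vivosCounter := PySem.Int.floordiv (index.length : Int) 2
  let vivos := (PySem.List.pyRange 0 vivosCounter 1).foldl
    (fun acc s => acc ++ [PySem.List.pyGetD index (s * 2) 0]) []
  if PySem.Int.mod (index.length : Int) 2 ≠ 0 then
    vivos.drop 1 ++ [PySem.List.pyGetD index ((index.length : Int) - 1) 0]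
  else vivos

theorem pvRound_length (index : List Int) (h : 2 ≤ index.length) :
    (pvRound index).length = index.length / 2 := by
  simp only [pvRound]
  have h2 : PySem.Int.floordiv (index.length : Int) 2 = ((index.length / 2 : Nat) : Int) := by
    exact_mod_cast PySem.Int.floordiv_natCast index.length 2
  have hm : PySem.Int.mod (index.length : Int) 2 = ((index.length % 2 : Nat) : Int) := by
    exact_mod_cast PySem.Int.mod_natCast index.length 2
  rw [h2, hm, PySem.List.foldl_append_singleton_eq_map, List.nil_append]
  by_cases hp : index.length % 2 = 0
  · rw [if_neg (by exact_mod_cast not_not_intro hp), List.length_map,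
      PySem.List.length_pyRange_one]
    omega
  · rw [if_pos (by exact_mod_cast hp), List.length_append, List.length_drop, List.length_map,
      PySem.List.length_pyRange_one, List.length_singleton]
    omega

def hungry_games (index : List Int) : Int :=
  if index.length = 0 then 0   -- totality guard: Python recurses forever on []; excluded by Pre_
  else if index.length = 1 then PySem.List.pyGetD index 0 0
  else hungry_games (pvRound index)
termination_by index.length
decreasing_by
  rw [pvRound_length index (by omega)]; omega

-- ===== PORT B =====
-- round lengths, outermost first:  while n > 1: lengths.append(n); n //= 2
def pvLens (n : Nat) : List Nat :=
  if n > 1 then n :: pvLens (n / 2) else []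
termination_by n
decreasing_by omega

def hungry_games_alt (index : List Int) : Int :=
  let lens := pvLens index.length
  let p := lens.reverse.foldl (fun p m => if m % 2 ≠ 0 then 2 * p + 2 else 2 * p) 0
  PySem.List.pyGetD index ((p : Nat) : Int) 0

-- ===== PRECONDITION & SPEC =====
-- Pre_ excludes only the empty list, on which A recurses forever (RecursionError).
def Pre_hungry_games (index : List Int) : Prop := index ≠ []
instance (index : List Int) : Decidable (Pre_hungry_games index) := by unfold Pre_hungry_games; infer_instance
def pvWitness_hungry_games : List Int := [3, 1, 4, 1, 5]

def Spec_hungry_games (index : List Int) (out : Int) : Prop := out = hungry_games_alt index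
instance (index : List Int) (out : Int) : Decidable (Spec_hungry_games index out) := by unfold Spec_hungry_games; infer_instance

-- ===== CLAIM (what is proved, stated in full; the proofs are below) =====
def Claim_equal_hungry_games : Prop := ∀ (index : List Int), Dom_hungry_games index → Pre_hungry_games index → Spec_hungry_games index (hungry_games index)

-- ===== LEMMAS AND PROOFS =====

-- the surviving position B computes, as a function of the length
def pvPos (n : Nat) : Nat :=
  (pvLens n).reverse.foldl (fun p m => if m % 2 ≠ 0 then 2 * p + 2 else 2 * p) 0

theorem pvPos_le_one {n : Nat} (h : n ≤ 1) : pvPos n = 0 := by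
  unfold pvPos pvLens
  simp [Nat.not_lt.mpr h]

theorem pvPos_step (n : Nat) (h : 1 < n) :
    pvPos n = if n % 2 ≠ 0 then 2 * pvPos (n / 2) + 2 else 2 * pvPos (n / 2) := by
  unfold pvPos
  rw [pvLens, if_pos h]
  simp [List.foldl_append]

theorem pvPos_lt : ∀ n : Nat, 1 ≤ n → pvPos n < n := by
  intro n
  induction n using Nat.strong_induction_on with
  | _ n ih =>
    intro h1
    rcases Nat.lt_or_ge n 2 with h | h
    · rw [pvPos_le_one (by omega)]; omega
    · have ihh := ih (n / 2) (by omega) (by omega)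
      rw [pvPos_step n (by omega)]
      split_ifs with hp <;> omega

-- closed form of one round of A: entry j is index[2j] (even length) / index[2j+2] (odd length)
theorem pvRound_eq (index : List Int) (h : 2 ≤ index.length) :
    pvRound index = (List.range (index.length / 2)).map
      (fun j => index.getD (2 * j + (if index.length % 2 ≠ 0 then 2 else 0)) 0) := by
  simp only [pvRound]
  have h2 : PySem.Int.floordiv (index.length : Int) 2 = ((index.length / 2 : Nat) : Int) := by
    exact_mod_cast PySem.Int.floordiv_natCast index.length 2
  have hm : PySem.Int.mod (index.length : Int) 2 = ((index.length % 2 : Nat) : Int) := by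
    exact_mod_cast PySem.Int.mod_natCast index.length 2
  rw [h2, hm, PySem.List.foldl_append_singleton_eq_map, List.nil_append,
    PySem.List.pyRange_zero_nat, List.map_map]
  have hbase : ∀ m : Nat,
      (List.range m).map ((fun s => PySem.List.pyGetD index (s * 2) 0) ∘ (fun k : Nat => (k : Int)))
        = (List.range m).map (fun j => index.getD (2 * j) 0) := by
    intro m
    apply List.map_congr_left
    intro k _
    simp only [Function.comp]
    rw [show ((k : Int) * 2) = ((2 * k : Nat) : Int) by push_cast; ring,
      PySem.List.pyGetD_natCast]
  rw [hbase]
  by_cases hp : index.length % 2 = 0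
  · rw [if_neg (by exact_mod_cast not_not_intro hp), if_neg (not_not_intro hp)]
    apply List.map_congr_left
    intro k _
    congr 1
  · rw [if_pos (by exact_mod_cast hp), if_pos hp]
    have hm1 : 1 ≤ index.length / 2 := by omega
    obtain ⟨m, hmeq⟩ : ∃ m, index.length / 2 = m + 1 := ⟨index.length / 2 - 1, by omega⟩
    conv_lhs => rw [hmeq, List.range_succ_eq_map]
    conv_rhs => rw [hmeq, List.range_succ]
    simp only [List.map_cons, List.map_map, List.drop_succ_cons, List.drop_zero,
      List.map_append]
    congr 1
    · simp only [List.map_nil]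
      rw [show ((index.length : Int) - 1) = ((index.length - 1 : Nat) : Int) by omega,
        PySem.List.pyGetD_natCast, show index.length - 1 = 2 * m + 2 by omega]

theorem hungry_games_eq_pos : ∀ n (index : List Int), index.length = n → index ≠ [] →
    hungry_games index = PySem.List.pyGetD index ((pvPos index.length : Nat) : Int) 0 := by
  intro n
  induction n using Nat.strong_induction_on with
  | _ n ih =>
    intro index hlen hne
    have hpos : 1 ≤ index.length := List.length_pos_of_ne_nil hne
    rw [hungry_games]
    rcases Nat.lt_or_ge index.length 2 with h2 | h2
    · have h1 : index.length = 1 := by omega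
      rw [if_neg (by omega), if_pos h1, pvPos_le_one (by omega)]
      norm_num
    · rw [if_neg (by omega), if_neg (by omega)]
      have hrl : (pvRound index).length = index.length / 2 := pvRound_length index h2
      have hrne : pvRound index ≠ [] := by
        intro hnil
        rw [hnil] at hrl
        simp only [List.length_nil] at hrl
        omega
      rw [ih (pvRound index).length (by omega) (pvRound index) rfl hrne, hrl]
      have hj : pvPos (index.length / 2) < index.length / 2 := pvPos_lt _ (by omega)
      rw [PySem.List.pyGetD_natCast, PySem.List.pyGetD_natCast, pvRound_eq index h2,
        PySem.List.getD_map_range _ _ _ _ hj]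
      congr 1
      rw [pvPos_step index.length (by omega)]
      split_ifs <;> omega

-- ===== VERDICT (by name: the statement is the Claim_ definition above) =====
theorem hungry_games_spec : Claim_equal_hungry_games := by
  intro index _ hpre
  unfold Spec_hungry_games hungry_games_alt
  exact hungry_games_eq_pos index.length index rfl hpre
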